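-- pv_equiv track=rewrite | github.com/ha-vo/building_chatbot_with_LLM_from_scratch | unigramTokenizer.py | generate_seed_candidates
-- ===== SOURCE A (Python) =====
-- import unicodedata
-- from collections import defaultdict, Counter
--
-- WS_MARK = "\u2581"
--
-- def normalizeText(s):
--     s = unicodedata.normalize("NFC",s)
--     return " ".join(s.split())
--
-- def add_ws_marker(s):
--     if not s: return ""
--     return WS_MARK + s.replace(" ", WS_MARK)
--
-- def generate_seed_candidates(corpus, maxSubword = 16, minCount = 2,
--                              maxCandidates = 200000):
--     counts = Counter()
--     for line in corpus:
--         line = normalizeText(line)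
--         if not line: continue
--         marked = add_ws_marker(line)
--         n = len(marked)
--
--         for i in range(n):
--             isStartOfWord = (marked[i] == WS_MARK)
--             maxL = min(maxSubword, n-i)
--
--             for l in range(1, maxL + 1):
--                 sub = marked[i:i+l]
--                 if isStartOfWord:
--                     counts[sub] += 1
--                 else:
--                     if WS_MARK not in sub: counts[sub] += 1
--
--     if counts.get(WS_MARK,0) == 0: counts[WS_MARK] = 1
--
--     # filtering >= minCount
--     candidates = [(t,c) for t,c in counts.items() if c >= minCount]
--     candidates.sort(key=lambda x: -x[1])
--     candidates = candidates[:maxCandidates]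
--     return dict(candidates)
-- ===== SOURCE B (Python) =====
-- import unicodedata
-- from collections import Counter
--
-- WS_MARK = "\u2581"
--
-- def normalizeText(s):
--     s = unicodedata.normalize("NFC", s)
--     return " ".join(s.split())
--
-- def add_ws_marker(s):
--     if not s: return ""
--     return WS_MARK + s.replace(" ", WS_MARK)
--
-- def _bump_prefixes(counts, s, maxSubword):
--     # count every prefix of s of length 1..min(maxSubword, len(s))
--     for l in range(1, min(maxSubword, len(s)) + 1):
--         counts[s[:l]] += 1
--
-- def generate_seed_candidates(corpus, maxSubword = 16, minCount = 2,
--                              maxCandidates = 200000):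
--     # Cursor walk over each marked line: at every word boundary count the
--     # prefixes of the remaining suffix (the WS_MARK-anchored candidates), then
--     # peel off the word and count the prefixes of each of its suffixes (the
--     # WS_MARK-free interior candidates) — no per-substring membership test.
--     counts = Counter()
--     for line in corpus:
--         rest = add_ws_marker(normalizeText(line))
--         while rest:
--             _bump_prefixes(counts, rest, maxSubword)
--             word = []
--             for ch in rest[1:]:
--                 if ch == WS_MARK:
--                     break
--                 word.append(ch)
--             word = "".join(word)
--             w = word
--             while w:
--                 _bump_prefixes(counts, w, maxSubword)
--                 w = w[1:]
--             rest = rest[1 + len(word):]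
--     if counts.get(WS_MARK, 0) == 0:
--         counts[WS_MARK] = 1
--     candidates = [(t, c) for t, c in counts.items() if c >= minCount]
--     candidates.sort(key=lambda x: -x[1])
--     return dict(candidates[:maxCandidates])
-- ===== Notes on version B (the rewrite author's own statement) =====
-- stated objective: alternative
-- what changed: B replaces A's index double-loop with per-substring WS_MARK membership tests by a cursor walk over suffixes of the marked line: at each word boundary it counts prefixes of the remaining suffix, then peels the word off with a break-scan and counts prefixes of each word suffix, so no membership test and no index arithmetic remain; the fallback, filter, sort and truncation are unchanged.
import Mathlib
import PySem

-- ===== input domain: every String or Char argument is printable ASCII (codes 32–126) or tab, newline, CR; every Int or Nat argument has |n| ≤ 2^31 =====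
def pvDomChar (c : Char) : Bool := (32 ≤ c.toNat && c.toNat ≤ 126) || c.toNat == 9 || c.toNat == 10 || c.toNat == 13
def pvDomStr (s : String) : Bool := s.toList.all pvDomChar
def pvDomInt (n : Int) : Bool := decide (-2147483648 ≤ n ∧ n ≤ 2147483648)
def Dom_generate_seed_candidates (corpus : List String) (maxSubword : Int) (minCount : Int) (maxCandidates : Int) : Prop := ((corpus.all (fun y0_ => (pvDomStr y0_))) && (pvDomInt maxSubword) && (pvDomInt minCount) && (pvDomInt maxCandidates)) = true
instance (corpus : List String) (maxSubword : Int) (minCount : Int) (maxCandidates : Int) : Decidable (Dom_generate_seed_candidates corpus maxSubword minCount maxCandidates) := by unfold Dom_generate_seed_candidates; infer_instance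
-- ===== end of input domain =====

-- B replaces A's index double-loop with per-substring WS_MARK membership tests by a cursor walk
-- over suffixes of the marked line (prefixes at boundaries, takeWhile to peel each word); objective: alternative.

-- ===== PORT A =====
-- shared module constant WS_MARK = "\u2581" (a single char; string ops are ported on the char list)
def pvWS : Char := '\u2581'
def pvWSStr : String := "\u2581"

-- normalizeText: unicodedata.normalize("NFC", s) is the identity on the ASCII domain Dom; then " ".join(s.split())
def pvNormalize (s : String) : String := PySem.Str.join " " (PySem.Str.split₀ s)

-- add_ws_marker: WS_MARK + s.replace(" ", WS_MARK)  (empty string stays empty)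
def pvAddWsMarker (s : String) : String :=
  if s = "" then "" else String.ofList (pvWS :: PySem.Chars.replace s.toList [' '] [pvWS])

-- counts[sub] += 1 (Counter: missing key counts as 0)
def pvIncr (counts : PySem.Dict String Int) (sub : List Char) : PySem.Dict String Int :=
  counts.modify (String.ofList sub) 0 (· + 1)

-- body of A's 'for line in corpus' loop
def pvCountLineA (maxSubword : Int) (counts : PySem.Dict String Int) (line : String) :
    PySem.Dict String Int :=
  let line := pvNormalize line
  if line = "" then counts else
  let marked := (pvAddWsMarker line).toList
  let n : Int := marked.length
  (PySem.List.pyRange 0 n 1).foldl (fun counts i =>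
    let isStartOfWord := PySem.List.pyGetD marked i ' ' == pvWS
    let maxL := min maxSubword (n - i)
    (PySem.List.pyRange 1 (maxL + 1) 1).foldl (fun counts l =>
      let sub := PySem.List.slice marked (some i) (some (i + l))
      if isStartOfWord then pvIncr counts sub
      else if !(PySem.Chars.isIn [pvWS] sub) then pvIncr counts sub else counts) counts) counts

def generate_seed_candidates (corpus : List String) (maxSubword : Int) (minCount : Int) (maxCandidates : Int) : List (String × Int) :=
  let counts := corpus.foldl (pvCountLineA maxSubword) PySem.Dict.empty
  let counts := if counts.getD pvWSStr 0 = 0 then counts.insert pvWSStr 1 else counts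
  let candidates := counts.items.filter (fun p => decide (minCount ≤ p.2))
  let candidates := PySem.List.sorted candidates (fun p => -p.2)
  let candidates := PySem.List.slice candidates none (some maxCandidates)
  (PySem.Dict.ofList candidates).items

-- ===== PORT B =====
-- _bump_prefixes: count every prefix s[:l], l = 1..min(maxSubword, len(s))
def pvPrefs (ms : Int) (xs : List Char) : List (List Char) :=
  (PySem.List.pyRange 1 (min ms (xs.length : Int) + 1) 1).map (fun l => xs.take l.toNat)

def pvBumpPrefs (ms : Int) (counts : PySem.Dict String Int) (xs : List Char) : PySem.Dict String Int :=
  (pvPrefs ms xs).foldl pvIncr counts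

-- the inner 'while w:' loop over the suffixes of the current word
def pvWordB (ms : Int) : List Char → PySem.Dict String Int → PySem.Dict String Int
  | [], counts => counts
  | c :: s, counts => pvWordB ms s (pvBumpPrefs ms counts (c :: s))

-- the 'while rest:' cursor walk: prefixes of the suffix, peel the word (the break-loop is a takeWhile), advance
def pvRestB (ms : Int) : List Char → PySem.Dict String Int → PySem.Dict String Int
  | [], counts => counts
  | c :: t, counts =>
      let counts := pvBumpPrefs ms counts (c :: t)
      let word := t.takeWhile (fun ch => !(ch == pvWS))
      pvRestB ms (t.drop word.length) (pvWordB ms word counts)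
termination_by rest => rest.length
decreasing_by simp

def pvCountLineB (ms : Int) (counts : PySem.Dict String Int) (line : String) : PySem.Dict String Int :=
  pvRestB ms (pvAddWsMarker (pvNormalize line)).toList counts

def generate_seed_candidates_alt (corpus : List String) (maxSubword : Int) (minCount : Int) (maxCandidates : Int) : List (String × Int) :=
  let counts := corpus.foldl (pvCountLineB maxSubword) PySem.Dict.empty
  let counts := if counts.getD pvWSStr 0 = 0 then counts.insert pvWSStr 1 else counts
  let candidates := counts.items.filter (fun p => decide (minCount ≤ p.2))
  let candidates := PySem.List.sorted candidates (fun p => -p.2)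
  let candidates := PySem.List.slice candidates none (some maxCandidates)
  (PySem.Dict.ofList candidates).items

-- ===== PRECONDITION & SPEC =====
def Spec_generate_seed_candidates (corpus : List String) (maxSubword : Int) (minCount : Int) (maxCandidates : Int) (out : List (String × Int)) : Prop := out = generate_seed_candidates_alt corpus maxSubword minCount maxCandidates
instance (corpus : List String) (maxSubword : Int) (minCount : Int) (maxCandidates : Int) (out : List (String × Int)) : Decidable (Spec_generate_seed_candidates corpus maxSubword minCount maxCandidates out) := by unfold Spec_generate_seed_candidates; infer_instance

-- ===== CLAIM (what is proved, stated in full; the proofs are below) =====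
def Claim_equal_generate_seed_candidates : Prop := ∀ (corpus : List String) (maxSubword : Int) (minCount : Int) (maxCandidates : Int), Dom_generate_seed_candidates corpus maxSubword minCount maxCandidates → Spec_generate_seed_candidates corpus maxSubword minCount maxCandidates (generate_seed_candidates corpus maxSubword minCount maxCandidates)

-- ===== LEMMAS AND PROOFS =====

-- the list of substrings counted at position i with length bound L (lengths 1..L)
def pvSubs (m : List Char) (i L : Int) : List (List Char) :=
  (PySem.List.pyRange 1 (L + 1) 1).map (fun l => PySem.List.slice m (some i) (some (i + l)))

-- the substrings A counts at position i
def pvFA (m : List Char) (ms i : Int) : List (List Char) :=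
  if PySem.List.pyGetD m i ' ' == pvWS then pvSubs m i (min ms ((m.length : Int) - i))
  else ((PySem.List.pyRange 1 (min ms ((m.length : Int) - i) + 1) 1).filter
          (fun l => !(PySem.Chars.isIn [pvWS] (PySem.List.slice m (some i) (some (i + l)))))).map
        (fun l => PySem.List.slice m (some i) (some (i + l)))

-- the substring sequence B's word loop counts
def pvSeqW (ms : Int) : List Char → List (List Char)
  | [] => []
  | c :: s => pvPrefs ms (c :: s) ++ pvSeqW ms s

-- the substring sequence B's cursor walk counts
def pvSeqR (ms : Int) : List Char → List (List Char)
  | [] => []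
  | c :: t =>
      let word := t.takeWhile (fun ch => !(ch == pvWS))
      pvPrefs ms (c :: t) ++ pvSeqW ms word ++ pvSeqR ms (t.drop word.length)
termination_by rest => rest.length
decreasing_by simp

lemma pv_filter_range_le (t : Int) : ∀ a b : Int,
    (PySem.List.pyRange a b 1).filter (fun l => decide (l ≤ t)) = PySem.List.pyRange a (min b (t + 1)) 1 := by
  intro a b
  induction hn : (b - a).toNat generalizing a with
  | zero =>
    rw [PySem.List.pyRange_one_eq_nil (by omega), PySem.List.pyRange_one_eq_nil (by omega)]
    rfl
  | succ n ih =>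
    have hab : a < b := by omega
    rw [PySem.List.pyRange_one_cons hab, List.filter_cons]
    by_cases hat : a ≤ t
    · simp only [decide_eq_true hat, PySem.List.pyRange_one_cons (show a < min b (t+1) by omega)]
      simp only [ih (a+1) (by omega)]
      rfl
    · simp only [decide_eq_false (by omega : ¬ a ≤ t)]
      have h1 : List.filter (fun l => decide (l ≤ t)) (PySem.List.pyRange (a+1) b 1) = [] :=
        List.filter_eq_nil_iff.2 (fun x hx => by
          rw [PySem.List.mem_pyRange_one] at hx; simp; omega)
      rw [h1, PySem.List.pyRange_one_eq_nil (by omega : min b (t+1) ≤ a)]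
      rfl

-- characterization of WS inside a slice
lemma pv_isIn_slice {m : List Char} {i l nxt : Int}
    (h0 : 0 ≤ i) (hl : 1 ≤ l) (hln : i + l ≤ (m.length : Int)) (hlt : i < nxt)
    (hall : ∀ x, i ≤ x → x < nxt → x < (m.length : Int) → ¬ m[x.toNat]! = pvWS)
    (hnext : nxt = (m.length : Int) ∨ (nxt < (m.length : Int) ∧ m[nxt.toNat]! = pvWS)) :
    PySem.Chars.isIn [pvWS] (PySem.List.slice m (some i) (some (i + l))) = (decide (nxt < i + l)) := by
  rw [PySem.List.slice_toNat m (a := i) (b := i + l) (by omega) (by omega)]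
  by_cases hc : nxt < i + l
  · simp only [decide_eq_true hc]
    rw [PySem.Chars.isIn_iff_infix, List.singleton_infix_iff]
    have hnn : nxt < (m.length : Int) ∧ m[nxt.toNat]! = pvWS := by
      rcases hnext with h | h
      · omega
      · exact h
    have hdropbound : nxt.toNat - i.toNat < (List.drop i.toNat m).length := by
      simp [List.length_drop]; omega
    have : (List.take ((i+l).toNat - i.toNat) (List.drop i.toNat m))[nxt.toNat - i.toNat]'(by
        simp [List.length_take, List.length_drop]; omega) = pvWS := by
      rw [List.getElem_take, List.getElem_drop]
      simp only [show i.toNat + (nxt.toNat - i.toNat) = nxt.toNat from by omega]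
      have hx : nxt.toNat < m.length := by omega
      simpa [List.getElem!_eq_getElem?_getD, List.getElem?_eq_getElem hx] using hnn.2
    exact this ▸ List.getElem_mem _
  · simp only [decide_eq_false hc]
    rw [Bool.eq_false_iff]
    intro hIn
    rw [PySem.Chars.isIn_iff_infix, List.singleton_infix_iff] at hIn
    obtain ⟨k, hk, hEq⟩ := List.mem_iff_getElem.1 hIn
    rw [List.getElem_take, List.getElem_drop] at hEq
    have hklt : k < (i+l).toNat - i.toNat := by
      have := hk
      simp [List.length_take, List.length_drop] at this
      omega
    have hmlen : i.toNat + k < m.length := by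
      have := hk
      simp [List.length_take, List.length_drop] at this
      omega
    have hxall := hall ((i.toNat + k : Nat) : Int) (by omega) (by omega) (by omega)
    apply hxall
    have : ((i.toNat + k : Nat) : Int).toNat = i.toNat + k := by omega
    rw [this]
    simpa [List.getElem!_eq_getElem?_getD, List.getElem?_eq_getElem hmlen] using hEq

lemma pv_fa_interior {m : List Char} {ms i nxt : Int}
    (h0 : 0 ≤ i) (hlt : i < nxt) (hle : nxt ≤ (m.length : Int))
    (hall : ∀ x, i ≤ x → x < nxt → (PySem.List.pyGetD m x ' ' == pvWS) = false)
    (hnext : nxt = (m.length : Int) ∨ (PySem.List.pyGetD m nxt ' ' == pvWS) = true) :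
    pvFA m ms i = pvSubs m i (min ms (nxt - i)) := by
  have hchar : ∀ x : Int, 0 ≤ x → x < (m.length : Int) →
      ((PySem.List.pyGetD m x ' ' == pvWS) = true ↔ m[x.toNat]! = pvWS) := by
    intro x hx0 hx1
    rw [PySem.List.pyGetD_eq_getElem m ' ' hx0 hx1, beq_iff_eq]
    have hb : x.toNat < m.length := by omega
    rw [List.getElem!_eq_getElem?_getD, List.getElem?_eq_getElem hb]
    simp
  have hall' : ∀ x, i ≤ x → x < nxt → x < (m.length : Int) → ¬ m[x.toNat]! = pvWS := by
    intro x hx1 hx2 hx3 hws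
    have := hall x hx1 hx2
    rw [← (hchar x (by omega) hx3)] at hws
    rw [this] at hws; exact Bool.false_ne_true hws
  have hnext' : nxt = (m.length : Int) ∨ (nxt < (m.length : Int) ∧ m[nxt.toNat]! = pvWS) := by
    rcases hnext with h | h
    · exact Or.inl h
    · by_cases hn : nxt = (m.length : Int)
      · exact Or.inl hn
      · exact Or.inr ⟨by omega, (hchar nxt (by omega) (by omega)).1 h⟩
  have hpi : (PySem.List.pyGetD m i ' ' == pvWS) = false := hall i le_rfl hlt
  unfold pvFA
  rw [hpi]
  simp only [Bool.false_eq_true, if_false]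
  have hpoint : ∀ l ∈ PySem.List.pyRange 1 (min ms ((m.length : Int) - i) + 1) 1,
      (!(PySem.Chars.isIn [pvWS] (PySem.List.slice m (some i) (some (i + l)))))
        = decide (l ≤ nxt - i) := by
    intro l hl
    rw [PySem.List.mem_pyRange_one] at hl
    rw [pv_isIn_slice h0 (by omega) (by omega) hlt hall' hnext']
    rcases le_or_gt l (nxt - i) with hcase | hcase
    · rw [decide_eq_true hcase, decide_eq_false (by omega : ¬ nxt < i + l)]; rfl
    · rw [decide_eq_false (by omega : ¬ l ≤ nxt - i), decide_eq_true (by omega : nxt < i + l)]; rfl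
  rw [List.filter_congr hpoint, pv_filter_range_le]
  unfold pvSubs
  have harith : min (min ms ((m.length : Int) - i) + 1) ((nxt - i) + 1) = min ms (nxt - i) + 1 := by omega
  rw [harith]

-- the position-i substrings, sliced from m, are exactly the prefixes of the suffix xs at i
lemma pv_subs_eq_prefs (m : List Char) (ms i : Int) (xs : List Char)
    (h0 : 0 ≤ i) (_hlen : i + (xs.length : Int) ≤ (m.length : Int))
    (hxs : xs = (m.drop i.toNat).take xs.length) :
    pvSubs m i (min ms (xs.length : Int)) = pvPrefs ms xs := by
  unfold pvSubs pvPrefs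
  apply List.map_congr_left
  intro l hl
  rw [PySem.List.mem_pyRange_one] at hl
  rw [PySem.List.slice_toNat m (a := i) (b := i + l) (by omega) (by omega)]
  have h1 : (i + l).toNat - i.toNat = l.toNat := by omega
  rw [h1]
  conv_rhs => rw [hxs]
  rw [List.take_take]
  congr 1
  omega

-- B's word loop counts A's interior substrings of the word span ending at nxt
lemma pv_word (m : List Char) (ms nxt : Int)
    (hle : nxt ≤ (m.length : Int))
    (hnext : nxt = (m.length : Int) ∨ (PySem.List.pyGetD m nxt ' ' == pvWS) = true) :
    ∀ (w : List Char) (i : Int), 0 ≤ i → i + (w.length : Int) = nxt →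
    w = (m.drop i.toNat).take w.length →
    (∀ x, i ≤ x → x < nxt → (PySem.List.pyGetD m x ' ' == pvWS) = false) →
    (PySem.List.pyRange i nxt 1).flatMap (pvFA m ms) = pvSeqW ms w := by
  intro w
  induction w with
  | nil =>
    intro i h0 hsum _ _
    simp at hsum
    rw [hsum, PySem.List.pyRange_one_eq_nil le_rfl]
    rfl
  | cons c s ih =>
    intro i h0 hsum hxs hall
    have hlt : i < nxt := by simp at hsum; omega
    rw [PySem.List.pyRange_one_cons hlt, List.flatMap_cons]
    have hmid : pvFA m ms i = pvPrefs ms (c :: s) := by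
      rw [pv_fa_interior h0 hlt hle hall hnext]
      have hn : nxt - i = ((c :: s).length : Int) := by simp at hsum ⊢; omega
      rw [hn]
      exact pv_subs_eq_prefs m ms i (c :: s) h0 (by simp at hsum ⊢; omega) hxs
    rw [hmid]
    have hs : s = (m.drop (i + 1).toNat).take s.length := by
      have h1 : (i + 1).toNat = i.toNat + 1 := by omega
      have := congrArg (List.drop 1) hxs
      simpa [List.drop_take, List.drop_drop, h1, Nat.add_comm 1 i.toNat] using this
    have htail := ih (i + 1) (by omega) (by simp at hsum ⊢; omega) hs
      (fun x hx1 hx2 => hall x (by omega) hx2)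
    rw [htail]
    simp [pvSeqW]

-- the cursor walk: from any boundary j, A's remaining substrings are B's sequence on the suffix
lemma pv_rest (m : List Char) (ms : Int) : ∀ (fuel : Nat) (j : Int),
    ((m.length : Int) - j).toNat ≤ fuel → 0 ≤ j → j ≤ (m.length : Int) →
    (j = (m.length : Int) ∨ (PySem.List.pyGetD m j ' ' == pvWS) = true) →
    (PySem.List.pyRange j (m.length : Int) 1).flatMap (pvFA m ms) = pvSeqR ms (m.drop j.toNat) := by
  intro fuel
  induction fuel with
  | zero =>
    intro j hf h0 hj _
    have hjn : j = (m.length : Int) := by omega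
    rw [hjn, PySem.List.pyRange_one_eq_nil le_rfl, List.drop_of_length_le (by omega)]
    simp [pvSeqR]
  | succ fuel ih =>
    intro j hf h0 hj hstart
    rcases hstart with hjn | hws
    · rw [hjn, PySem.List.pyRange_one_eq_nil le_rfl, List.drop_of_length_le (by omega)]
      simp [pvSeqR]
    · have hjlt : j < (m.length : Int) := by
        rcases lt_or_eq_of_le hj with h' | h'
        · exact h'
        · exfalso
          rw [h'] at hws
          rw [show ((m.length : Int)) = ((m.length : Nat) : Int) from rfl,
              PySem.List.pyGetD_natCast] at hws
          simp at hws
          exact absurd hws (by decide)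
      obtain ⟨c, t, hR⟩ : ∃ c t, m.drop j.toNat = c :: t := by
        cases hE : m.drop j.toNat with
        | nil =>
          exfalso
          have := congrArg List.length hE
          simp [List.length_drop] at this
          omega
        | cons c t => exact ⟨c, t, rfl⟩
      have ht : t = m.drop (j.toNat + 1) := by
        have h2 := congrArg (List.drop 1) hR
        simp [List.drop_drop] at h2
        exact h2.symm
      have hwpre : t.takeWhile (fun ch => !(ch == pvWS))
          = t.take (t.takeWhile (fun ch => !(ch == pvWS))).length :=
        List.prefix_iff_eq_take.1 (List.takeWhile_prefix _)
      have hwlen : (t.takeWhile (fun ch => !(ch == pvWS))).length ≤ t.length :=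
        (List.takeWhile_prefix _).length_le
      have htlen : (t.length : Int) = (m.length : Int) - j - 1 := by
        rw [ht]; simp [List.length_drop]; omega
      set wl : Nat := (t.takeWhile (fun ch => !(ch == pvWS))).length with hwl
      set nxt : Int := j + 1 + (wl : Int) with hnxt
      have hnle : nxt ≤ (m.length : Int) := by omega
      have hdw : t.drop wl = t.dropWhile (fun ch => !(ch == pvWS)) := by
        conv_lhs => rw [← List.takeWhile_append_dropWhile
          (p := fun ch => !(ch == pvWS)) (l := t)]
        exact List.drop_left
      have hdropnxt : m.drop nxt.toNat = t.drop wl := by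
        rw [ht, List.drop_drop]
        congr 1
        omega
      have hallW : ∀ x : Int, j + 1 ≤ x → x < nxt →
          (PySem.List.pyGetD m x ' ' == pvWS) = false := by
        intro x hx1 hx2
        have hx3 : x < (m.length : Int) := by omega
        rw [PySem.List.pyGetD_eq_getElem m ' ' (by omega) hx3]
        have ha : x.toNat - (j.toNat + 1) < wl := by omega
        have hbt : x.toNat - (j.toNat + 1) < t.length := by omega
        have hbm : x.toNat < m.length := by omega
        have hq : (t.takeWhile (fun ch => !(ch == pvWS)))[x.toNat - (j.toNat + 1)]?
            = m[x.toNat]? := by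
          rw [hwpre, List.getElem?_take_of_lt (by omega), ht, List.getElem?_drop]
          congr 1
          omega
        have hmem : m[x.toNat]'hbm ∈ t.takeWhile (fun ch => !(ch == pvWS)) :=
          List.mem_of_getElem? (by rw [hq, List.getElem?_eq_getElem hbm])
        have hpred := List.mem_takeWhile_imp hmem
        simpa using hpred
      have hnextW : nxt = (m.length : Int) ∨ (PySem.List.pyGetD m nxt ' ' == pvWS) = true := by
        cases hD : t.drop wl with
        | nil =>
          left
          have := congrArg List.length hD
          simp [List.length_drop] at this
          omega
        | cons c' t' =>
          right
          have hne : t.dropWhile (fun ch => !(ch == pvWS)) ≠ [] := by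
            rw [← hdw, hD]; simp
          have hpc' := List.head_dropWhile_not (fun ch => !(ch == pvWS)) hne
          have hdwc : t.dropWhile (fun ch => !(ch == pvWS)) = c' :: t' := by
            rw [← hdw, hD]
          have hhead : (t.dropWhile (fun ch => !(ch == pvWS))).head hne = c' := by
            simp [hdwc]
          rw [hhead] at hpc'
          have hc' : c' = pvWS := by simpa using hpc'
          have hnlt : nxt < (m.length : Int) := by
            have := congrArg List.length hD
            simp [List.length_drop] at this
            omega
          rw [PySem.List.pyGetD_eq_getElem m ' ' (by omega) hnlt]
          have hget : m[nxt.toNat]? = some c' := by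
            have h0' : (m.drop nxt.toNat)[0]? = some c' := by rw [hdropnxt, hD]; rfl
            rw [List.getElem?_drop] at h0'
            simpa using h0'
          have h2 := List.getElem?_eq_getElem (l := m) (i := nxt.toNat)
            (show nxt.toNat < m.length by omega)
          rw [hget] at h2
          have hval := Option.some.inj h2
          simp [← hval, hc']
      have hsplit : PySem.List.pyRange j (m.length : Int) 1
          = j :: (PySem.List.pyRange (j+1) nxt 1 ++ PySem.List.pyRange nxt (m.length : Int) 1) := by
        rw [← PySem.List.pyRange_one_append (j+1) nxt (m.length : Int) (by omega) (by omega),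
            ← PySem.List.pyRange_one_cons hjlt]
      rw [hsplit, List.flatMap_cons, List.flatMap_append]
      have hlenct : ((c :: t).length : Int) = (m.length : Int) - j := by
        simp; omega
      have hfaj : pvFA m ms j = pvPrefs ms (c :: t) := by
        unfold pvFA
        rw [hws, if_pos rfl,
            show min ms ((m.length : Int) - j) = min ms (((c :: t).length : Int)) from by
              rw [hlenct]]
        exact pv_subs_eq_prefs m ms j (c :: t) h0 (by omega)
          (by rw [← hR]; exact (List.take_length).symm)
      have hxsw : t.takeWhile (fun ch => !(ch == pvWS))
          = (m.drop (j+1).toNat).take (t.takeWhile (fun ch => !(ch == pvWS))).length := by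
        rw [show (j+1).toNat = j.toNat + 1 from by omega, ← ht]
        exact hwpre
      have hmid := pv_word m ms nxt hnle hnextW (t.takeWhile (fun ch => !(ch == pvWS))) (j+1)
        (by omega) (by rw [← hwl, hnxt]) hxsw (fun x hx1 hx2 => hallW x hx1 hx2)
      have htail := ih nxt (by rw [hnxt]; omega) (by rw [hnxt]; omega) hnle hnextW
      rw [hmid, hfaj, htail, hdropnxt, hR]
      rw [pvSeqR]
      simp [← hwl]

lemma pv_foldW (ms : Int) : ∀ (w : List Char) (counts : PySem.Dict String Int),
    pvWordB ms w counts = (pvSeqW ms w).foldl pvIncr counts := by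
  intro w
  induction w with
  | nil => intro counts; rfl
  | cons c s ih =>
    intro counts
    rw [pvWordB, pvSeqW, List.foldl_append, ih]
    rfl

lemma pv_foldR (ms : Int) : ∀ (fuel : Nat) (rest : List Char) (counts : PySem.Dict String Int),
    rest.length ≤ fuel → pvRestB ms rest counts = (pvSeqR ms rest).foldl pvIncr counts := by
  intro fuel
  induction fuel with
  | zero =>
    intro rest counts h
    have : rest = [] := List.eq_nil_of_length_eq_zero (by omega)
    subst this; simp [pvRestB, pvSeqR]
  | succ fuel ih =>
    intro rest counts h
    cases rest with
    | nil => simp [pvRestB, pvSeqR]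
    | cons c t =>
      rw [pvRestB, pvSeqR]
      simp only [List.foldl_append]
      rw [ih _ _ (by simp at h ⊢; have := List.length_drop (l := t) (i := (t.takeWhile (fun ch => !(ch == pvWS))).length); omega), pv_foldW]
      rfl

-- A's per-line loop counts exactly the pvFA substrings, in order
lemma pv_foldA (m : List Char) (ms : Int) (counts : PySem.Dict String Int) :
    (PySem.List.pyRange 0 (m.length : Int) 1).foldl (fun counts i =>
      (PySem.List.pyRange 1 (min ms ((m.length : Int) - i) + 1) 1).foldl (fun counts l =>
        if PySem.List.pyGetD m i ' ' == pvWS then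
          pvIncr counts (PySem.List.slice m (some i) (some (i + l)))
        else if !(PySem.Chars.isIn [pvWS] (PySem.List.slice m (some i) (some (i + l)))) then
          pvIncr counts (PySem.List.slice m (some i) (some (i + l))) else counts) counts) counts
    = ((PySem.List.pyRange 0 (m.length : Int) 1).flatMap (pvFA m ms)).foldl pvIncr counts := by
  rw [List.foldl_flatMap]
  apply PySem.List.foldl_congr_mem
  intro acc i _
  by_cases hp : (PySem.List.pyGetD m i ' ' == pvWS) = true
  · simp only [hp, if_true]
    unfold pvFA pvSubs
    rw [hp, if_pos rfl, List.foldl_map]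
  · rw [Bool.not_eq_true] at hp
    simp only [hp, Bool.false_eq_true, if_false]
    unfold pvFA pvSubs
    rw [hp]
    simp only [Bool.false_eq_true, if_false]
    rw [List.foldl_map, PySem.List.foldl_if_eq_foldl_filter]

lemma pv_rest0 {m : List Char} (ms : Int) {r : List Char} (hm : m = pvWS :: r) :
    (PySem.List.pyRange 0 (m.length : Int) 1).flatMap (pvFA m ms) = pvSeqR ms m := by
  have hn : 0 < (m.length : Int) := by subst hm; simp
  have hp0 : (PySem.List.pyGetD m 0 ' ' == pvWS) = true := by
    rw [PySem.List.pyGetD_eq_getElem m ' ' le_rfl hn]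
    subst hm; simp
  have := pv_rest m ms ((m.length : Int) - 0).toNat 0 le_rfl le_rfl (by omega) (Or.inr hp0)
  simpa using this

lemma pv_line_eq (ms : Int) (counts : PySem.Dict String Int) (line : String) :
    pvCountLineA ms counts line = pvCountLineB ms counts line := by
  unfold pvCountLineA pvCountLineB
  by_cases h : pvNormalize line = ""
  · simp [h, pvAddWsMarker, pvRestB]
  · simp only [if_neg h]
    have hmm : (pvAddWsMarker (pvNormalize line)).toList
        = pvWS :: PySem.Chars.replace (pvNormalize line).toList [' '] [pvWS] := by
      unfold pvAddWsMarker
      rw [if_neg h, String.toList_ofList]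
    rw [pv_foldA _ ms counts, pv_foldR ms (pvAddWsMarker (pvNormalize line)).toList.length _ counts le_rfl,
        pv_rest0 ms hmm]

-- ===== VERDICT (by name: the statement is the Claim_ definition above) =====
theorem generate_seed_candidates_spec : Claim_equal_generate_seed_candidates := by
  intro corpus maxSubword minCount maxCandidates _
  unfold Spec_generate_seed_candidates
  unfold generate_seed_candidates generate_seed_candidates_alt
  have h : corpus.foldl (pvCountLineA maxSubword) PySem.Dict.empty
      = corpus.foldl (pvCountLineB maxSubword) PySem.Dict.empty :=
    PySem.List.foldl_congr_mem corpus _ _ _ (fun acc line _ => pv_line_eq maxSubword acc line)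
  rw [h]
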